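-- pv_equiv track=rewrite | github.com/bizoibeniaminu9z-droid/NER---Deep-Learning-Project | src/06_infer.py | merge_wordpieces
-- ===== SOURCE A (Python) =====
-- def merge_wordpieces(tokens, labels, scores):
--     merged_tokens, merged_labels, merged_scores = [], [], []
--
--     for tok, lab, sc in zip(tokens, labels, scores):
--         if tok.startswith("##") and merged_tokens:
--             merged_tokens[-1] = merged_tokens[-1] + tok[2:]
--
--         else:
--             merged_tokens.append(tok)
--             merged_labels.append(lab)
--             merged_scores.append(sc)
--
--     return merged_tokens, merged_labels, merged_scores
-- ===== SOURCE B (Python) =====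
-- def merge_wordpieces(tokens, labels, scores):
--     triples = list(zip(tokens, labels, scores))
--     n = len(triples)
--     out_tokens, out_labels, out_scores = [], [], []
--     i = 0
--     while i < n:
--         j = i + 1
--         while j < n and triples[j][0].startswith("##"):
--             j += 1
--         seg = triples[i:j]
--         out_tokens.append(seg[0][0] + "".join(t[2:] for t, _, _ in seg[1:]))
--         out_labels.append(seg[0][1])
--         out_scores.append(seg[0][2])
--         i = j
--     return out_tokens, out_labels, out_scores
-- ===== Notes on version B (the rewrite author's own statement) =====
-- stated objective: alternative
-- what changed: A folds left over the zipped triples mutating the last emitted token on each '##' continuation; B decomposes the zipped triples into word segments (head plus the span of following '##' tokens) and emits one joined token/label/score per segment.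
import Mathlib
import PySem

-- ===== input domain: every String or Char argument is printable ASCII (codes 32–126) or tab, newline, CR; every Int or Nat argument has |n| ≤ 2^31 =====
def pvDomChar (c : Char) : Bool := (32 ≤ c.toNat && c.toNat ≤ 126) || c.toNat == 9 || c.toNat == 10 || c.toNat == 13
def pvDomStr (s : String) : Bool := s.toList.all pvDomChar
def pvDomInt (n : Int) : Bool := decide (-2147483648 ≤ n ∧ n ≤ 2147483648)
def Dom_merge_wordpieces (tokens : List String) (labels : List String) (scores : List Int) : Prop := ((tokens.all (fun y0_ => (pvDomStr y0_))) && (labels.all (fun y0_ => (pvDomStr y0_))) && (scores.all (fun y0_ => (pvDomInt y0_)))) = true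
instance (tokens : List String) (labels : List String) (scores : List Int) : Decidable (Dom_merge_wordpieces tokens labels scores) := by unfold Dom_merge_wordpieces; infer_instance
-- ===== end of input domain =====

-- B replaces A's fold-with-last-mutation by a segment decomposition (span off the
-- '##' continuations of each word, emit one triple per segment); objective: alternative
-- decomposition, same cost.

-- ===== PORT A =====
-- merged_tokens[-1] = merged_tokens[-1] + suffix  (update of the last element in place)
def pyUpdateLast (f : String → String) : List String → List String
  | [] => []
  | [a] => [f a]
  | a :: b :: rest => a :: pyUpdateLast f (b :: rest)

-- one iteration of A's for-loop over (tok, (lab, sc))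
def mwStepA (st : List String × List String × List Int) (x : String × String × Int) :
    List String × List String × List Int :=
  if PySem.Str.startswith x.1 "##" && !(st.1 == []) then
    (pyUpdateLast (fun w => w ++ PySem.Str.slice x.1 (some 2) none) st.1, st.2.1, st.2.2)
  else
    (st.1 ++ [x.1], st.2.1 ++ [x.2.1], st.2.2 ++ [x.2.2])

def merge_wordpieces (tokens : List String) (labels : List String) (scores : List Int) :
    List String × List String × List Int :=
  (tokens.zip (labels.zip scores)).foldl mwStepA ([], [], [])

-- ===== PORT B =====
-- t[2:] for a zipped triple
def mwDrop2 (t : String × String × Int) : String := PySem.Str.slice t.1 (some 2) none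

-- whether a triple's token continues the current word
def mwCont (t : String × String × Int) : Bool := PySem.Str.startswith t.1 "##"

-- Source B's outer while-loop: the head of the remaining triples starts a segment, the
-- inner while (j += 1 while startswith '##') takes the continuation run, then recurse
-- on the rest.
def mwGo : List (String × String × Int) → List String × List String × List Int
  | [] => ([], [], [])
  | x :: rest =>
    let cont := rest.takeWhile mwCont
    let rest' := rest.dropWhile mwCont
    let out := mwGo rest'
    ((x.1 ++ PySem.Str.join "" (cont.map mwDrop2)) :: out.1, x.2.1 :: out.2.1, x.2.2 :: out.2.2)
  termination_by xs => xs.length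
  decreasing_by
    simpa using Nat.lt_succ_of_le (List.length_dropWhile_le _ _)

def merge_wordpieces_alt (tokens : List String) (labels : List String) (scores : List Int) :
    List String × List String × List Int :=
  mwGo (tokens.zip (labels.zip scores))

-- ===== PRECONDITION & SPEC =====
def Spec_merge_wordpieces (tokens : List String) (labels : List String) (scores : List Int) (out : List String × List String × List Int) : Prop := out = merge_wordpieces_alt tokens labels scores
instance (tokens : List String) (labels : List String) (scores : List Int) (out : List String × List String × List Int) : Decidable (Spec_merge_wordpieces tokens labels scores out) := by unfold Spec_merge_wordpieces; infer_instance

-- ===== CLAIM (what is proved, stated in full; the proofs are below) =====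
def Claim_equal_merge_wordpieces : Prop := ∀ (tokens : List String) (labels : List String) (scores : List Int), Dom_merge_wordpieces tokens labels scores → Spec_merge_wordpieces tokens labels scores (merge_wordpieces tokens labels scores)

-- ===== LEMMAS AND PROOFS =====

theorem str_join_empty_nil : PySem.Str.join "" [] = "" := by
  simp [PySem.Str.join]

theorem str_join_empty_cons (s : String) (rest : List String) :
    PySem.Str.join "" (s :: rest) = s ++ PySem.Str.join "" rest := by
  apply String.toList_inj.mp
  simp [PySem.Str.toList_join, PySem.Chars.join]
  cases rest <;> simp [List.intercalate]

theorem pyUpdateLast_append (f : String → String) (mt : List String) (w : String) :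
    pyUpdateLast f (mt ++ [w]) = mt ++ [f w] := by
  induction mt with
  | nil => simp [pyUpdateLast]
  | cons a rest ih =>
      cases rest with
      | nil => simp [pyUpdateLast]
      | cons b r => simpa [pyUpdateLast] using ih

-- A's loop from a state whose token list already ends in the word w under construction
-- equals: finish w with the continuation run, then B's segment recursion on the rest.
theorem mw_fold (xs : List (String × String × Int)) :
    ∀ (mt ml : List String) (ms : List Int) (w : String),
      xs.foldl mwStepA (mt ++ [w], ml, ms) =
        (mt ++ (w ++ PySem.Str.join "" ((xs.takeWhile mwCont).map mwDrop2)) :: (mwGo (xs.dropWhile mwCont)).1,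
         ml ++ (mwGo (xs.dropWhile mwCont)).2.1,
         ms ++ (mwGo (xs.dropWhile mwCont)).2.2) := by
  induction xs with
  | nil =>
      intro mt ml ms w
      simp [mwGo, str_join_empty_nil]
  | cons x xs ih =>
      intro mt ml ms w
      by_cases hx : mwCont x = true
      · have hstep : mwStepA (mt ++ [w], ml, ms) x =
            (mt ++ [w ++ mwDrop2 x], ml, ms) := by
          simp [mwStepA, mwCont, mwDrop2] at hx ⊢
          simp [hx, pyUpdateLast_append]
        rw [List.foldl_cons, hstep, ih mt ml ms (w ++ mwDrop2 x)]
        simp [hx, str_join_empty_cons,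
          String.append_assoc]
      · have hx' : mwCont x = false := by simpa using hx
        have hstep : mwStepA (mt ++ [w], ml, ms) x =
            ((mt ++ [w]) ++ [x.1], ml ++ [x.2.1], ms ++ [x.2.2]) := by
          simp [mwStepA, mwCont] at hx' ⊢
          simp [hx']
        rw [List.foldl_cons, hstep, ih (mt ++ [w]) (ml ++ [x.2.1]) (ms ++ [x.2.2]) x.1]
        simp only [List.takeWhile_cons, List.dropWhile_cons, hx', Bool.false_eq_true,
          if_false]
        rw [show mwGo (x :: xs) =
              ((x.1 ++ PySem.Str.join "" ((xs.takeWhile mwCont).map mwDrop2)) :: (mwGo (xs.dropWhile mwCont)).1,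
               x.2.1 :: (mwGo (xs.dropWhile mwCont)).2.1,
               x.2.2 :: (mwGo (xs.dropWhile mwCont)).2.2) from by rw [mwGo]]
        simp [str_join_empty_nil]

-- ===== VERDICT (by name: the statement is the Claim_ definition above) =====
theorem merge_wordpieces_spec : Claim_equal_merge_wordpieces := by
  intro tokens labels scores _
  unfold Spec_merge_wordpieces merge_wordpieces merge_wordpieces_alt
  cases hz : tokens.zip (labels.zip scores) with
  | nil => simp [mwGo]
  | cons x xs =>
      have hstep : mwStepA ([], [], []) x = ([] ++ [x.1], [x.2.1], [x.2.2]) := by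
        simp [mwStepA]
      rw [List.foldl_cons, hstep, mw_fold xs [] [x.2.1] [x.2.2] x.1]
      rw [show mwGo (x :: xs) =
            ((x.1 ++ PySem.Str.join "" ((xs.takeWhile mwCont).map mwDrop2)) :: (mwGo (xs.dropWhile mwCont)).1,
             x.2.1 :: (mwGo (xs.dropWhile mwCont)).2.1,
             x.2.2 :: (mwGo (xs.dropWhile mwCont)).2.2) from by rw [mwGo]]
      simp
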